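-- pv_equiv track=rewrite | github.com/perryrighthere/ba4ai | scripts/export_notebook_outputs.py | _cell_heading
-- ===== SOURCE A (Python) =====
-- def _cell_heading(cell_md: str) -> str:
--     for line in cell_md.splitlines():
--         if line.strip().startswith("#"):
--             return line.strip()
--     # fallback: first non-empty line
--     for line in cell_md.splitlines():
--         if line.strip():
--             return line.strip()
--     return "Section"
-- ===== SOURCE B (Python) =====
-- def _cell_heading(cell_md: str) -> str:
--     first_nonempty = None
--     for line in cell_md.splitlines():
--         s = line.strip()
--         if s.startswith("#"):
--             return s
--         if s and first_nonempty is None: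
--             first_nonempty = s
--     return first_nonempty if first_nonempty is not None else "Section"
-- ===== Notes on version B (the rewrite author's own statement) =====
-- stated objective: alternative
-- what changed: Fuses A's two separate passes over splitlines (heading scan, then first-non-empty scan) into a single traversal that records the first non-empty stripped line while scanning for a heading.
import Mathlib
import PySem

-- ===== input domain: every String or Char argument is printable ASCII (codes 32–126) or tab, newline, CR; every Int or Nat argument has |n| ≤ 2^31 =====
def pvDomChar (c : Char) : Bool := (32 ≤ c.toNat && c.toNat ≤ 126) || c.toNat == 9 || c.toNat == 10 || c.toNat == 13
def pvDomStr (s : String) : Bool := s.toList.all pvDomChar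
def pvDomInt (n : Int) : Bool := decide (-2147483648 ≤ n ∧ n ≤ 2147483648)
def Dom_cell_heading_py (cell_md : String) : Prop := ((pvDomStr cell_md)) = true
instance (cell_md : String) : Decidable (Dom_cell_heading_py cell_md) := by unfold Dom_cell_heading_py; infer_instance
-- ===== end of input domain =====

-- B fuses A's two passes over splitlines into one traversal carrying the first non-empty stripped line; same result, strip computed once per line.

-- ===== PORT A =====
-- first loop: return line.strip() for the first line whose strip starts with "#"
def cellHeadingScanHash : List String → Option String
  | [] => none
  | l :: ls =>
    if PySem.Str.startswith (PySem.Str.strip l) "#" then some (PySem.Str.strip l)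
    else cellHeadingScanHash ls

-- second loop: return line.strip() for the first line whose strip is non-empty
def cellHeadingScanNonempty : List String → Option String
  | [] => none
  | l :: ls =>
    if PySem.Str.strip l ≠ "" then some (PySem.Str.strip l)
    else cellHeadingScanNonempty ls

def cell_heading_py (cell_md : String) : String :=
  match cellHeadingScanHash (PySem.Str.splitlines cell_md) with
  | some s => s
  | none =>
    match cellHeadingScanNonempty (PySem.Str.splitlines cell_md) with
    | some s => s
    | none => "Section"

-- ===== PORT B =====
-- single pass, accumulator = first_nonempty (None at the start)
def cellHeadingFused : List String → Option String → String
  | [], acc => acc.getD "Section"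
  | l :: ls, acc =>
    let s := PySem.Str.strip l
    if PySem.Str.startswith s "#" then s
    else if s ≠ "" ∧ acc = none then cellHeadingFused ls (some s)
    else cellHeadingFused ls acc

def cell_heading_py_alt (cell_md : String) : String :=
  cellHeadingFused (PySem.Str.splitlines cell_md) none

-- ===== PRECONDITION & SPEC =====
def Spec_cell_heading_py (cell_md : String) (out : String) : Prop := out = cell_heading_py_alt cell_md
instance (cell_md : String) (out : String) : Decidable (Spec_cell_heading_py cell_md out) := by unfold Spec_cell_heading_py; infer_instance

-- ===== CLAIM (what is proved, stated in full; the proofs are below) =====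
def Claim_equal_cell_heading_py : Prop := ∀ (cell_md : String), Dom_cell_heading_py cell_md → Spec_cell_heading_py cell_md (cell_heading_py cell_md)

-- ===== LEMMAS AND PROOFS =====
-- invariant of the fused loop: it equals "heading scan, else acc, else non-empty scan"
theorem cellHeadingFused_eq (ls : List String) (acc : Option String) :
    cellHeadingFused ls acc =
      match cellHeadingScanHash ls with
      | some s => s
      | none =>
        match acc with
        | some a => a
        | none =>
          match cellHeadingScanNonempty ls with
          | some s => s
          | none => "Section" := by
  induction ls generalizing acc with
  | nil => cases acc <;> simp [cellHeadingFused, cellHeadingScanHash, cellHeadingScanNonempty, Option.getD]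
  | cons l ls ih =>
    simp only [cellHeadingFused, cellHeadingScanHash, cellHeadingScanNonempty]
    by_cases hh : PySem.Str.startswith (PySem.Str.strip l) "#" = true
    · rw [if_pos hh, if_pos hh]
    · rw [if_neg hh, if_neg hh]
      by_cases hs : PySem.Str.strip l = ""
      · rw [if_neg (by simp [hs]), ih, if_neg (by simp [hs])]
      · cases acc with
        | none =>
          rw [if_pos ⟨hs, rfl⟩, ih, if_pos hs]
        | some a =>
          rw [if_neg (by simp), ih, if_pos hs]

-- ===== VERDICT (by name: the statement is the Claim_ definition above) =====
theorem cell_heading_py_spec : Claim_equal_cell_heading_py := by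
  intro cell_md _
  unfold Spec_cell_heading_py cell_heading_py cell_heading_py_alt
  rw [cellHeadingFused_eq]
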